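-- pv_equiv track=rewrite | github.com/liupengsay/PyIsTheBestLang | algorithm/src/search/bfs.py | lc_1368
-- ===== SOURCE A (Python) =====
-- from collections import deque
-- from typing import List
--
-- def lc_1368(grid: List[List[int]]) -> int:
--     # 模板：使用队列实现0-1 BFS 即优先选择距离较短的路线
--     m, n = len(grid), len(grid[0])
--     ceil = int(1e9)
--     dist = [0] + [ceil] * (m * n - 1)
--     seen = set()
--     q = deque([(0, 0)])
--
--     while q:
--         # 也可以使用 Dijkstra 进行求解
--         x, y = q.popleft()
--         if (x, y) in seen:
--             continue
--         seen.add((x, y))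
--         cur_pos = x * n + y
--         for i, (nx, ny) in enumerate([(x, y + 1), (x, y - 1), (x + 1, y), (x - 1, y)]):
--             new_pos = nx * n + ny
--             new_dis = dist[cur_pos] + (1 if grid[x][y] != i + 1 else 0)
--             if 0 <= nx < m and 0 <= ny < n and new_dis < dist[new_pos]:
--                 dist[new_pos] = new_dis
--                 if grid[x][y] == i + 1:
--                     q.appendleft((nx, ny))
--                 else:
--                     q.append((nx, ny))
--     return dist[m * n - 1]
-- ===== SOURCE B (Python) =====
-- import heapq
-- from typing import List
--
--
-- def lc_1368(grid: List[List[int]]) -> int: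
--     # Dijkstra over flat positions with a binary heap and stale-entry skipping;
--     # each popped position relaxes its four neighbors by explicit guarded steps.
--     m, n = len(grid), len(grid[0])
--     total = m * n
--     ceil = int(1e9)
--     dist = [0] + [ceil] * (total - 1)
--     heap = [(0, 0)]
--     while heap:
--         d, pos = heapq.heappop(heap)
--         if d > dist[pos]:
--             continue
--         g = grid[pos // n][pos % n]
--         if pos % n + 1 < n:
--             nd = d + (0 if g == 1 else 1)
--             if nd < dist[pos + 1]:
--                 dist[pos + 1] = nd
--                 heapq.heappush(heap, (nd, pos + 1))
--         if 0 < pos % n: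
--             nd = d + (0 if g == 2 else 1)
--             if nd < dist[pos - 1]:
--                 dist[pos - 1] = nd
--                 heapq.heappush(heap, (nd, pos - 1))
--         if pos // n + 1 < m:
--             nd = d + (0 if g == 3 else 1)
--             if nd < dist[pos + n]:
--                 dist[pos + n] = nd
--                 heapq.heappush(heap, (nd, pos + n))
--         if 0 < pos // n:
--             nd = d + (0 if g == 4 else 1)
--             if nd < dist[pos - n]:
--                 dist[pos - n] = nd
--                 heapq.heappush(heap, (nd, pos - n))
--     return dist[total - 1]
-- ===== Notes on version B (the rewrite author's own statement) =====
-- stated objective: alternative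
-- what changed: Replaced the 0-1 BFS (deque with appendleft/append two-tier frontier, a seen set over (x,y) pairs, and a fold over enumerate of a direction list) by heap-based Dijkstra working entirely on flat positions: stale entries are skipped by a distance check, the cell value is read once via pos//n, pos%n, and the four neighbors are relaxed by explicit guarded position-arithmetic steps (pos+1, pos-1, pos+n, pos-n); both compute the exact min-cost distances, so the returned value is identical.
import Mathlib
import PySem

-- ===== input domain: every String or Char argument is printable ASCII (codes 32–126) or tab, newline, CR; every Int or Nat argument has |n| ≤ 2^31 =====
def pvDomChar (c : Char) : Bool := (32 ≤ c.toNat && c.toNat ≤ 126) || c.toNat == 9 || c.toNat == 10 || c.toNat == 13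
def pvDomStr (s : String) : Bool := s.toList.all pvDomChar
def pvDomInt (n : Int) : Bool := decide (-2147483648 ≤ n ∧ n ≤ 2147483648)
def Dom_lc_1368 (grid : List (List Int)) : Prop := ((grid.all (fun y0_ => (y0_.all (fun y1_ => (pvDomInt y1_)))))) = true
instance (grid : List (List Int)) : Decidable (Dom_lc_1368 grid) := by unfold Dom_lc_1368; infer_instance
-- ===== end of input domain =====

-- B replaces A's 0-1 BFS (deque + seen set over coordinate pairs, fold over an
-- enumerated direction list) by heap-based Dijkstra on flat positions with
-- stale-entry skipping and four explicit guarded relaxations; both compute the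
-- exact min-cost distances, so the return value is identical on Pre_lc_1368.

-- ===== PORT A =====
-- grid cell accessor grid[x][y]
def lcG (grid : List (List Int)) (x y : Int) : Int :=
  PySem.List.pyGetD (PySem.List.pyGetD grid x []) y 0

-- the four enumerate(...) direction entries of A
def lcADirs (x y : Int) : List (Int × (Int × Int)) :=
  [(0, (x, y + 1)), (1, (x, y - 1)), (2, (x + 1, y)), (3, (x - 1, y))]

-- body of A's for-loop: one direction's relaxation, mutating (dist, q)
def lcAStep (grid : List (List Int)) (m n x y : Int)
    (st : List Int × List (Int × Int)) (iv : Int × (Int × Int)) :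
    List Int × List (Int × Int) :=
  if 0 ≤ iv.2.1 ∧ iv.2.1 < m ∧ 0 ≤ iv.2.2 ∧ iv.2.2 < n ∧
      PySem.List.pyGetD st.1 (x * n + y) 0 +
        (if lcG grid x y ≠ iv.1 + 1 then 1 else 0) <
        PySem.List.pyGetD st.1 (iv.2.1 * n + iv.2.2) 0 then
    if lcG grid x y = iv.1 + 1 then
      (PySem.List.pySetD st.1 (iv.2.1 * n + iv.2.2)
        (PySem.List.pyGetD st.1 (x * n + y) 0 +
          (if lcG grid x y ≠ iv.1 + 1 then 1 else 0)), iv.2 :: st.2)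
    else
      (PySem.List.pySetD st.1 (iv.2.1 * n + iv.2.2)
        (PySem.List.pyGetD st.1 (x * n + y) 0 +
          (if lcG grid x y ≠ iv.1 + 1 then 1 else 0)), st.2 ++ [iv.2])
  else st

def lcALoop (grid : List (List Int)) (m n : Int) :
    Nat → List Int → PySem.Set (Int × Int) → List (Int × Int) → List Int
  | 0, dist, _, _ => dist
  | _ + 1, dist, _, [] => dist
  | fuel + 1, dist, seen, (x, y) :: q =>
    if PySem.Set.contains seen (x, y) then lcALoop grid m n fuel dist seen q
    else
      lcALoop grid m n fuel
        ((lcADirs x y).foldl (lcAStep grid m n x y) (dist, q)).1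
        (PySem.Set.add seen (x, y))
        ((lcADirs x y).foldl (lcAStep grid m n x y) (dist, q)).2

def lc_1368 (grid : List (List Int)) : Int :=
  PySem.List.pyGetD
    (lcALoop grid grid.length (PySem.List.pyGetD grid 0 []).length
      (5 * (grid.length * ((PySem.List.pyGetD grid 0 []).length : Int)).toNat * 1000000000 + 2)
      ((0 : Int) :: List.replicate
        (grid.length * ((PySem.List.pyGetD grid 0 []).length : Int) - 1).toNat 1000000000)
      PySem.Set.empty [(0, 0)])
    (grid.length * ((PySem.List.pyGetD grid 0 []).length : Int) - 1) 0

-- ===== PORT B =====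
-- B's cell read: g = grid[pos // n][pos % n]
def lcBG (grid : List (List Int)) (n pos : Int) : Int :=
  PySem.List.pyGetD (PySem.List.pyGetD grid (PySem.Int.floordiv pos n) [])
    (PySem.Int.mod pos n) 0

-- heapq as a priority queue: heappush = ordered insert (min key first), heappop = head
def lcBPush (e : Int × Int) : List (Int × Int) → List (Int × Int)
  | [] => [e]
  | f :: t =>
    if e.1 < f.1 ∨ (e.1 = f.1 ∧ e.2 ≤ f.2) then e :: f :: t else f :: lcBPush e t

-- one guarded relaxation body: nd = d + (0 if g == c else 1); improve dist[npos] and push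
def lcBRel (g c npos d : Int) (st : List Int × List (Int × Int)) :
    List Int × List (Int × Int) :=
  if d + (if g = c then 0 else 1) < PySem.List.pyGetD st.1 npos 0 then
    (PySem.List.pySetD st.1 npos (d + (if g = c then 0 else 1)),
     lcBPush (d + (if g = c then 0 else 1), npos) st.2)
  else st

-- the four if-blocks of B's loop body (right, left, down, up)
def lcBVisit (grid : List (List Int)) (m n d pos : Int)
    (st : List Int × List (Int × Int)) : List Int × List (Int × Int) :=
  let g := lcBG grid n pos
  let st1 := if PySem.Int.mod pos n + 1 < n then lcBRel g 1 (pos + 1) d st else st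
  let st2 := if 0 < PySem.Int.mod pos n then lcBRel g 2 (pos - 1) d st1 else st1
  let st3 := if PySem.Int.floordiv pos n + 1 < m then lcBRel g 3 (pos + n) d st2 else st2
  if 0 < PySem.Int.floordiv pos n then lcBRel g 4 (pos - n) d st3 else st3

def lcBLoop (grid : List (List Int)) (m n : Int) :
    Nat → List Int → List (Int × Int) → List Int
  | 0, dist, _ => dist
  | _ + 1, dist, [] => dist
  | fuel + 1, dist, (d, pos) :: heap =>
    if PySem.List.pyGetD dist pos 0 < d then lcBLoop grid m n fuel dist heap
    else
      lcBLoop grid m n fuel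
        (lcBVisit grid m n d pos (dist, heap)).1
        (lcBVisit grid m n d pos (dist, heap)).2

def lc_1368_alt (grid : List (List Int)) : Int :=
  let m : Int := grid.length
  let n : Int := (PySem.List.pyGetD grid 0 []).length
  let total : Int := m * n
  PySem.List.pyGetD
    (lcBLoop grid m n (5 * total.toNat * 1000000000 + 2)
      ((0 : Int) :: List.replicate (total - 1).toNat 1000000000) [(0, 0)])
    (total - 1) 0

-- ===== PRECONDITION & SPEC =====
-- Pre_lc_1368: the grid is nonempty, its first row is nonempty, and every row has at
-- least the first row's length — exactly the inputs on which the Python A returns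
-- (otherwise grid[0][0]/grid[x][y] raises IndexError, since every cell is eventually
-- popped: all four moves are always allowed, only their cost differs).
def Pre_lc_1368 (grid : List (List Int)) : Prop :=
  0 < grid.length ∧ 0 < (PySem.List.pyGetD grid 0 []).length ∧
  ∀ row ∈ grid, (PySem.List.pyGetD grid 0 []).length ≤ row.length
instance (grid : List (List Int)) : Decidable (Pre_lc_1368 grid) := by
  unfold Pre_lc_1368; infer_instance

def pvWitness_lc_1368 : List (List Int) := [[1]]

def Spec_lc_1368 (grid : List (List Int)) (out : Int) : Prop := out = lc_1368_alt grid
instance (grid : List (List Int)) (out : Int) : Decidable (Spec_lc_1368 grid out) := by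
  unfold Spec_lc_1368; infer_instance

-- ===== CLAIM (what is proved, stated in full; the proofs are below) =====
def Claim_equal_lc_1368 : Prop := ∀ (grid : List (List Int)), Dom_lc_1368 grid →
  Pre_lc_1368 grid → Spec_lc_1368 grid (lc_1368 grid)

-- ===== LEMMAS AND PROOFS =====

-- in-bounds predicate
def lcInB (m n x y : Int) : Prop := 0 ≤ x ∧ x < m ∧ 0 ≤ y ∧ y < n

-- edge weight
def lcW (grid : List (List Int)) (x y i : Int) : Int :=
  if lcG grid x y = i + 1 then 0 else 1

-- paths from (0,0) with their cost
inductive lcPath (grid : List (List Int)) (m n : Int) : Int → Int → Int → Prop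
  | start : lcPath grid m n 0 0 0
  | step {x y c i x' y'} : lcPath grid m n x y c → lcInB m n x y →
      (i, (x', y')) ∈ lcADirs x y → lcInB m n x' y' →
      lcPath grid m n x' y' (c + lcW grid x y i)

noncomputable def lcTarget (grid : List (List Int)) (m n x y : Int) : Int :=
  @dite Int (∃ c : ℕ, lcPath grid m n x y (c : Int) ∧ (c : Int) < 1000000000)
    (Classical.propDecidable _)
    (fun _ => ((sInf {c : ℕ | lcPath grid m n x y (c : Int)} : ℕ) : Int))
    (fun _ => 1000000000)

-- distance-array accessor
def lcDA (dist : List Int) (n x y : Int) : Int :=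
  PySem.List.pyGetD dist (x * n + y) 0

theorem lcW_nonneg (grid : List (List Int)) (x y i : Int) : 0 ≤ lcW grid x y i := by
  unfold lcW; split <;> omega

theorem lcPath_nonneg {grid : List (List Int)} {m n x y c : Int}
    (h : lcPath grid m n x y c) : 0 ≤ c := by
  induction h with
  | start => omega
  | @step x1 y1 c1 i1 x1' y1' _ _ _ _ ih => have := lcW_nonneg grid x1 y1 i1; omega

-- index arithmetic
theorem lcPos_bounds {m n x y : Int} (h : lcInB m n x y) :
    0 ≤ x * n + y ∧ x * n + y < m * n := by
  obtain ⟨hx0, hxm, hy0, hyn⟩ := h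
  constructor
  · nlinarith
  · nlinarith

theorem lcPos_div {n x y : Int} (hn : 0 < n) (hy0 : 0 ≤ y) (hyn : y < n) :
    (x * n + y) / n = x ∧ (x * n + y) % n = y := by
  constructor
  · rw [add_comm, Int.add_mul_ediv_right _ _ (by omega : n ≠ 0),
      Int.ediv_eq_zero_of_lt hy0 hyn]; omega
  · rw [Int.mul_add_emod_self_right]; exact Int.emod_eq_of_lt hy0 hyn

theorem lcPos_inj {m n x y x' y' : Int} (hn : 0 < n)
    (h : lcInB m n x y) (h' : lcInB m n x' y') (e : x * n + y = x' * n + y') :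
    x = x' ∧ y = y' := by
  obtain ⟨_, _, hy0, hyn⟩ := h
  obtain ⟨_, _, hy0', hyn'⟩ := h'
  have d1 := (lcPos_div (x := x) hn hy0 hyn).1
  have d2 := (lcPos_div (x := x') hn hy0' hyn').1
  have hx : x = x' := by rw [← d1, ← d2, e]
  subst hx
  exact ⟨rfl, by omega⟩

-- lcDA on a pySetD update
theorem lcDA_set {m n : Int} (dist : List Int) (hlen : dist.length = (m * n).toNat)
    {px py x y : Int} (hp : lcInB m n px py) (hq : lcInB m n x y) (v : Int) :
    lcDA (PySem.List.pySetD dist (px * n + py) v) n x y =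
      if x = px ∧ y = py then v else lcDA dist n x y := by
  have hn : 0 < n := by obtain ⟨_, _, _, _⟩ := hq; omega
  have hb1 := lcPos_bounds hp
  have hb2 := lcPos_bounds hq
  have hl1 : (px * n + py).toNat < dist.length := by omega
  have hl2 : (x * n + y).toNat < dist.length := by omega
  unfold lcDA
  rw [PySem.List.pySetD_of_nonneg _ _ (by omega)]
  rw [PySem.List.pyGetD_eq_getElem _ _ (by omega) (by simp; omega),
      List.getElem_set]
  split
  · next he =>
    have : x * n + y = px * n + py := by omega
    have := lcPos_inj hn hq hp this
    rw [if_pos ⟨this.1, this.2⟩]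
  · next he =>
    have hne : ¬(x = px ∧ y = py) := by
      rintro ⟨rfl, rfl⟩; omega
    rw [if_neg hne, PySem.List.pyGetD_eq_getElem _ _ (by omega) (by omega)]

theorem lcDA_init {m n x y : Int} (h : lcInB m n x y) :
    lcDA ((0 : Int) :: List.replicate (m * n - 1).toNat 1000000000) n x y =
      if x = 0 ∧ y = 0 then 0 else 1000000000 := by
  have hb := lcPos_bounds h
  obtain ⟨hx0, hxm, hy0, hyn⟩ := h
  have hn : 0 < n := by omega
  unfold lcDA
  rw [PySem.List.pyGetD_eq_getElem _ _ (by omega) (by simp; omega)]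
  rcases Nat.eq_zero_or_pos (x * n + y).toNat with h0 | hp
  · have : x * n + y = 0 := by omega
    have := lcPos_inj hn (⟨hx0, hxm, hy0, hyn⟩ : lcInB m n x y)
      (⟨le_refl 0, by omega, le_refl 0, by omega⟩ : lcInB m n 0 0)
      (by simp only [zero_mul, zero_add]; omega)
    rw [if_pos ⟨this.1, this.2⟩]
    simp [h0]
  · have hne : ¬(x = 0 ∧ y = 0) := by
      rintro ⟨rfl, rfl⟩; omega
    rw [if_neg hne]
    rw [List.getElem_cons]
    split
    · omega
    · simp [List.getElem_replicate]

-- ===== final characterization =====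
theorem lcFinal_char (grid : List (List Int)) (m n : Int) (dist : List Int)
    (h0 : lcDA dist n 0 0 = 0)
    (hub : ∀ x y, lcInB m n x y → lcDA dist n x y ≤ 1000000000)
    (hpath : ∀ x y, lcInB m n x y →
      lcDA dist n x y = 1000000000 ∨ lcPath grid m n x y (lcDA dist n x y))
    (hstab : ∀ x y i x' y', lcInB m n x y → (i, (x', y')) ∈ lcADirs x y →
      lcInB m n x' y' → lcDA dist n x' y' ≤ lcDA dist n x y + lcW grid x y i) :
    ∀ x y, lcInB m n x y → lcDA dist n x y = lcTarget grid m n x y := by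
  have le_any : ∀ x y c, lcPath grid m n x y c → lcDA dist n x y ≤ c := by
    intro x y c hc
    induction hc with
    | start => omega
    | step hp hb hd hb' ih =>
      have := hstab _ _ _ _ _ hb hd hb'
      omega
  intro x y hxy
  unfold lcTarget
  by_cases hex : ∃ c : ℕ, lcPath grid m n x y (c : Int) ∧ (c : Int) < 1000000000
  · rw [dif_pos hex]
    obtain ⟨c, hc, hlt⟩ := hex
    have hne : (setOf (fun c : ℕ => lcPath grid m n x y (c : Int))).Nonempty := ⟨c, hc⟩
    have hmem := Nat.sInf_mem hne
    have hle := le_any x y _ hmem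
    have hsle : sInf (setOf (fun c : ℕ => lcPath grid m n x y (c : Int))) ≤ c :=
      Nat.sInf_le hc
    have hdlt : lcDA dist n x y < 1000000000 := by
      have : ((sInf (setOf (fun c : ℕ => lcPath grid m n x y (c : Int))) : ℕ) : Int) ≤ (c : Int) := by
        exact_mod_cast hsle
      omega
    rcases hpath x y hxy with he | hp
    · omega
    · have h0d : 0 ≤ lcDA dist n x y := lcPath_nonneg hp
      have hmem2 : (lcDA dist n x y).toNat ∈
          setOf (fun c : ℕ => lcPath grid m n x y (c : Int)) := by
        simp only [Set.mem_setOf_eq, Int.toNat_of_nonneg h0d]; exact hp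
      have hinf2 := Nat.sInf_le hmem2
      have : ((sInf (setOf (fun c : ℕ => lcPath grid m n x y (c : Int))) : ℕ) : Int)
          ≤ lcDA dist n x y := by omega
      omega
  · rw [dif_neg hex]
    push Not at hex
    have := hub x y hxy
    rcases hpath x y hxy with he | hp
    · omega
    · by_contra hne2
      have h0d : 0 ≤ lcDA dist n x y := lcPath_nonneg hp
      have := hex (lcDA dist n x y).toNat (by
        rw [Int.toNat_of_nonneg h0d]; exact hp)
      omega

-- ===== shared small lemmas =====
def lcSum (dist : List Int) : Nat := (dist.map Int.toNat).sum

theorem lcSum_set_lt {dist : List Int} {t : Nat} {v : Int} (ht : t < dist.length)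
    (hv : 0 ≤ v) (hlt : v < dist[t]) :
    lcSum (dist.set t v) + 1 ≤ lcSum dist := by
  induction dist generalizing t with
  | nil => simp at ht
  | cons a l ih =>
    cases t with
    | zero =>
      simp only [List.set_cons_zero, lcSum, List.map_cons, List.sum_cons]
      have : v.toNat + 1 ≤ a.toNat := by
        simp only [List.getElem_cons_zero] at hlt; omega
      omega
    | succ t =>
      simp only [List.set_cons_succ, lcSum, List.map_cons, List.sum_cons]
      have := ih (t := t) (by simpa using ht) (by simpa using hlt)
      simp only [lcSum] at this
      omega

theorem lcBPush_mem {e a : Int × Int} {l : List (Int × Int)} :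
    a ∈ lcBPush e l ↔ a = e ∨ a ∈ l := by
  induction l with
  | nil => simp [lcBPush]
  | cons f t ih =>
    simp only [lcBPush]
    split
    · constructor
      · intro h; simp only [List.mem_cons] at h ⊢; tauto
      · intro h; simp only [List.mem_cons] at h ⊢; tauto
    · constructor
      · intro h; simp only [List.mem_cons, ih] at h ⊢; tauto
      · intro h; simp only [List.mem_cons, ih] at h ⊢; tauto

theorem lcBPush_length (e : Int × Int) (l : List (Int × Int)) :
    (lcBPush e l).length = l.length + 1 := by
  induction l with
  | nil => simp [lcBPush]
  | cons f t ih =>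
    simp only [lcBPush]
    split <;> simp [ih]

theorem lcDirs_ne_self {x y : Int} {iv : Int × (Int × Int)} (h : iv ∈ lcADirs x y) :
    iv.2 ≠ (x, y) := by
  simp only [lcADirs, List.mem_cons, List.not_mem_nil, or_false] at h
  rcases h with h | h | h | h <;> subst h <;> intro he <;>
    (rw [Prod.ext_iff] at he; simp only [] at he; omega)

-- A's weight expression equals lcW flipped
theorem lcW_flip (grid : List (List Int)) (x y i : Int) :
    (if lcG grid x y ≠ i + 1 then (1 : Int) else 0) = lcW grid x y i := by
  unfold lcW; split <;> simp_all

-- ===== B invariant =====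
structure BInv (grid : List (List Int)) (m n : Int) (dist : List Int)
    (heap : List (Int × Int)) : Prop where
  hlen : dist.length = (m * n).toNat
  h0 : lcDA dist n 0 0 = 0
  hval : ∀ x y, lcInB m n x y → 0 ≤ lcDA dist n x y ∧ lcDA dist n x y ≤ 1000000000 ∧
    (lcDA dist n x y = 1000000000 ∨ lcPath grid m n x y (lcDA dist n x y))
  hheap : ∀ e ∈ heap, ∃ hx hy, lcInB m n hx hy ∧ e.2 = hx * n + hy ∧
    lcDA dist n hx hy ≤ e.1 ∧ e.1 < 1000000000
  hP : ∀ x y, lcInB m n x y → lcDA dist n x y = 1000000000 ∨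
    (lcDA dist n x y, x * n + y) ∈ heap ∨
    (∀ i x' y', (i, (x', y')) ∈ lcADirs x y → lcInB m n x' y' →
      lcDA dist n x' y' ≤ lcDA dist n x y + lcW grid x y i)

-- mid-visit invariant for B (hPmid: the hP disjunction for every node except the popped one)
structure BMid (grid : List (List Int)) (m n x y d : Int) (bud : Nat)
    (done : List (Int × (Int × Int))) (dist : List Int)
    (heap : List (Int × Int)) : Prop where
  hlen : dist.length = (m * n).toNat
  h0 : lcDA dist n 0 0 = 0
  hval : ∀ zx zy, lcInB m n zx zy → 0 ≤ lcDA dist n zx zy ∧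
    lcDA dist n zx zy ≤ 1000000000 ∧
    (lcDA dist n zx zy = 1000000000 ∨ lcPath grid m n zx zy (lcDA dist n zx zy))
  hheap : ∀ e ∈ heap, ∃ hx hy, lcInB m n hx hy ∧ e.2 = hx * n + hy ∧
    lcDA dist n hx hy ≤ e.1 ∧ e.1 < 1000000000
  hPmid : ∀ zx zy, lcInB m n zx zy → ¬(zx = x ∧ zy = y) →
    lcDA dist n zx zy = 1000000000 ∨
    (lcDA dist n zx zy, zx * n + zy) ∈ heap ∨
    (∀ i x' y', (i, (x', y')) ∈ lcADirs zx zy → lcInB m n x' y' →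
      lcDA dist n x' y' ≤ lcDA dist n zx zy + lcW grid zx zy i)
  hxyb : lcInB m n x y
  hpathd : lcPath grid m n x y d
  hxyv : lcDA dist n x y = d
  hdone : ∀ iv ∈ done, lcInB m n iv.2.1 iv.2.2 →
    lcDA dist n iv.2.1 iv.2.2 ≤ d + lcW grid x y iv.1
  hmu : 5 * lcSum dist + heap.length ≤ bud

-- one in-bounds B relaxation preserves the mid-visit invariant
theorem lcBRel_mid {grid : List (List Int)} {m n x y d : Int} {bud : Nat}
    {done : List (Int × (Int × Int))} {dist : List Int} {heap : List (Int × Int)}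
    {i x' y' : Int} (hiv : (i, (x', y')) ∈ lcADirs x y) (hbInB : lcInB m n x' y')
    (H : BMid grid m n x y d bud done dist heap) :
    BMid grid m n x y d bud (done ++ [(i, (x', y'))])
      (lcBRel (lcG grid x y) (i + 1) (x' * n + y') d (dist, heap)).1
      (lcBRel (lcG grid x y) (i + 1) (x' * n + y') d (dist, heap)).2 := by
  obtain ⟨hlen, h0, hval, hheap, hP, hxyb, hpathd, hxyv, hdone, hmu⟩ := H
  have hw : (if lcG grid x y = i + 1 then (0 : Int) else 1) = lcW grid x y i := rfl
  by_cases hupd : d + (if lcG grid x y = i + 1 then (0 : Int) else 1) <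
      PySem.List.pyGetD dist (x' * n + y') 0
  · -- successful relaxation
    have hst : lcBRel (lcG grid x y) (i + 1) (x' * n + y') d (dist, heap) =
        (PySem.List.pySetD dist (x' * n + y') (d + lcW grid x y i),
         lcBPush (d + lcW grid x y i, x' * n + y') heap) := by
      unfold lcBRel
      rw [if_pos hupd, hw]
    have hlt : d + lcW grid x y i < lcDA dist n x' y' := by
      rw [← hw]; exact hupd
    have hd0 : 0 ≤ d := by
      have := hval x y hxyb; omega
    have hnew0 : 0 ≤ d + lcW grid x y i := by
      have := lcW_nonneg grid x y i; omega
    have hset : ∀ {zx zy : Int}, lcInB m n zx zy →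
        lcDA (PySem.List.pySetD dist (x' * n + y') (d + lcW grid x y i))
          n zx zy =
        if zx = x' ∧ zy = y' then d + lcW grid x y i
        else lcDA dist n zx zy := by
      intro zx zy hz
      exact lcDA_set dist hlen hbInB hz _
    have hDAle : ∀ {zx zy : Int}, lcInB m n zx zy →
        lcDA (PySem.List.pySetD dist (x' * n + y') (d + lcW grid x y i))
          n zx zy ≤ lcDA dist n zx zy := by
      intro zx zy hz
      rw [hset hz]
      split
      · next he => rcases he with ⟨e1, e2⟩; subst e1; subst e2; omega
      · omega
    have hne_xy : ¬(x = x' ∧ y = y') := by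
      have := lcDirs_ne_self hiv
      rintro ⟨e1, e2⟩
      exact this (Prod.ext_iff.mpr ⟨e1.symm, e2.symm⟩)
    have hpath_new : lcPath grid m n x' y' (d + lcW grid x y i) :=
      lcPath.step hpathd hxyb hiv hbInB
    have hceil_nbr : lcDA dist n x' y' ≤ 1000000000 :=
      (hval _ _ hbInB).2.1
    have key : BMid grid m n x y d bud (done ++ [(i, (x', y'))])
        (PySem.List.pySetD dist (x' * n + y') (d + lcW grid x y i))
        (lcBPush (d + lcW grid x y i, x' * n + y') heap) := by
      refine ⟨?_, ?_, ?_, ?_, ?_, hxyb, hpathd, ?_, ?_, ?_⟩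
      · rw [PySem.List.length_pySetD]; exact hlen
      · have h00 : lcInB m n 0 0 := by
          obtain ⟨h1, h2, h3, h4⟩ := hxyb
          exact ⟨le_refl 0, by omega, le_refl 0, by omega⟩
        rw [hset h00]
        split
        · next he =>
          rcases he with ⟨e1, e2⟩
          rw [← e1, ← e2] at hlt
          rw [show lcDA dist n 0 0 = 0 from h0] at hlt
          omega
        · exact h0
      · intro zx zy hz
        rw [hset hz]
        split
        · next he =>
          rcases he with ⟨e1, e2⟩; subst e1; subst e2
          exact ⟨hnew0, by omega, Or.inr hpath_new⟩
        · exact hval zx zy hz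
      · intro e he
        rw [lcBPush_mem] at he
        rcases he with rfl | he
        · refine ⟨x', y', hbInB, rfl, ?_, by omega⟩
          rw [hset hbInB, if_pos ⟨rfl, rfl⟩]
        · obtain ⟨hx, hy, hI, hpos, hle, hlt'⟩ := hheap e he
          exact ⟨hx, hy, hI, hpos, le_trans (hDAle hI) hle, hlt'⟩
      · intro zx zy hz hzne
        by_cases hzeq : zx = x' ∧ zy = y'
        · refine Or.inr (Or.inl ?_)
          rw [hset hz, if_pos hzeq]
          rcases hzeq with ⟨e1, e2⟩; subst e1; subst e2
          rw [lcBPush_mem]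
          exact Or.inl rfl
        · rcases hP zx zy hz hzne with hc | hmem | hrel
          · exact Or.inl (by rw [hset hz, if_neg hzeq]; exact hc)
          · refine Or.inr (Or.inl ?_)
            rw [hset hz, if_neg hzeq, lcBPush_mem]
            exact Or.inr hmem
          · refine Or.inr (Or.inr ?_)
            intro j zx' zy' hd' hI'
            have h1 := hDAle hI'
            have h2 := hrel j zx' zy' hd' hI'
            rw [hset hz, if_neg hzeq]
            omega
      · rw [hset hxyb, if_neg hne_xy]; exact hxyv
      · intro jv hj hIj
        rcases List.mem_append.mp hj with hj | hj
        · have := hdone jv hj hIj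
          have := hDAle hIj
          omega
        · rw [List.mem_singleton] at hj; subst hj
          rw [hset hIj, if_pos ⟨rfl, rfl⟩]
      · have hb0 := lcPos_bounds hbInB
        have htlt : (x' * n + y').toNat < dist.length := by omega
        have hgetd : lcDA dist n x' y' = dist[(x' * n + y').toNat] := by
          unfold lcDA
          rw [PySem.List.pyGetD_eq_getElem _ _ (by omega) (by omega)]
        have hsum := lcSum_set_lt htlt hnew0 (by rw [← hgetd]; omega)
        rw [PySem.List.pySetD_of_nonneg _ _ (by omega), lcBPush_length]
        omega
    rw [hst]; exact key
  · -- no improvement: state unchanged, direction recorded as relaxed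
    have hst : lcBRel (lcG grid x y) (i + 1) (x' * n + y') d (dist, heap) =
        (dist, heap) := by
      unfold lcBRel
      rw [if_neg hupd]
    rw [hst]
    refine ⟨hlen, h0, hval, hheap, hP, hxyb, hpathd, hxyv, ?_, hmu⟩
    intro jv hj hIj
    rcases List.mem_append.mp hj with hj | hj
    · exact hdone jv hj hIj
    · rw [List.mem_singleton] at hj; subst hj
      rw [hw] at hupd
      exact not_lt.mp hupd

-- a direction that is out of bounds may always be recorded as relaxed
theorem lcBMid_skip {grid : List (List Int)} {m n x y d : Int} {bud : Nat}
    {done : List (Int × (Int × Int))} {dist : List Int} {heap : List (Int × Int)}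
    {i x' y' : Int} (hoob : ¬ lcInB m n x' y')
    (H : BMid grid m n x y d bud done dist heap) :
    BMid grid m n x y d bud (done ++ [(i, (x', y'))]) dist heap := by
  obtain ⟨hlen, h0, hval, hheap, hP, hxyb, hpathd, hxyv, hdone, hmu⟩ := H
  refine ⟨hlen, h0, hval, hheap, hP, hxyb, hpathd, hxyv, ?_, hmu⟩
  intro jv hj hIj
  rcases List.mem_append.mp hj with hj | hj
  · exact hdone jv hj hIj
  · rw [List.mem_singleton] at hj; subst hj
    exact absurd hIj hoob

-- one guarded relaxation (guard ↔ in-bounds) preserves the mid-visit invariant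
theorem lcBGuard_mid {grid : List (List Int)} {m n x y d : Int} {bud : Nat}
    {done : List (Int × (Int × Int))} {dist : List Int} {heap : List (Int × Int)}
    {i x' y' : Int} {cond : Prop} [Decidable cond]
    (hcond : cond ↔ lcInB m n x' y') (hiv : (i, (x', y')) ∈ lcADirs x y)
    (H : BMid grid m n x y d bud done dist heap) :
    BMid grid m n x y d bud (done ++ [(i, (x', y'))])
      (if cond then lcBRel (lcG grid x y) (i + 1) (x' * n + y') d (dist, heap)
       else (dist, heap)).1
      (if cond then lcBRel (lcG grid x y) (i + 1) (x' * n + y') d (dist, heap)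
       else (dist, heap)).2 := by
  by_cases h : cond
  · rw [if_pos h]
    exact lcBRel_mid hiv (hcond.mp h) H
  · rw [if_neg h]
    exact lcBMid_skip (fun hI => h (hcond.mpr hI)) H

-- B's visit of the popped node relaxes all four directions
theorem lcBVisit_mid {grid : List (List Int)} {m n x y d : Int} {bud : Nat}
    {dist : List Int} {heap : List (Int × Int)}
    (H : BMid grid m n x y d bud [] dist heap) :
    BMid grid m n x y d bud (lcADirs x y)
      (lcBVisit grid m n d (x * n + y) (dist, heap)).1
      (lcBVisit grid m n d (x * n + y) (dist, heap)).2 := by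
  obtain ⟨hx0, hxm, hy0, hyn⟩ := H.hxyb
  have hn : 0 < n := by omega
  have hfl : PySem.Int.floordiv (x * n + y) n = x := by
    rw [PySem.Int.floordiv_eq_ediv_of_pos hn]; exact (lcPos_div hn hy0 hyn).1
  have hmd : PySem.Int.mod (x * n + y) n = y := by
    rw [PySem.Int.mod_eq_emod_of_pos hn]; exact (lcPos_div hn hy0 hyn).2
  have hg : lcBG grid n (x * n + y) = lcG grid x y := by
    unfold lcBG lcG; rw [hfl, hmd]
  have e1 : x * n + y + 1 = x * n + (y + 1) := by ring
  have e2 : x * n + y - 1 = x * n + (y - 1) := by ring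
  have e3 : x * n + y + n = (x + 1) * n + y := by ring
  have e4 : x * n + y - n = (x - 1) * n + y := by ring
  have d0 : ((0 : Int), (x, y + 1)) ∈ lcADirs x y := by simp [lcADirs]
  have d1 : ((1 : Int), (x, y - 1)) ∈ lcADirs x y := by simp [lcADirs]
  have d2 : ((2 : Int), (x + 1, y)) ∈ lcADirs x y := by simp [lcADirs]
  have d3 : ((3 : Int), (x - 1, y)) ∈ lcADirs x y := by simp [lcADirs]
  have c0 : (y + 1 < n) ↔ lcInB m n x (y + 1) := by unfold lcInB; omega
  have c1 : (0 < y) ↔ lcInB m n x (y - 1) := by unfold lcInB; omega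
  have c2 : (x + 1 < m) ↔ lcInB m n (x + 1) y := by unfold lcInB; omega
  have c3 : (0 < x) ↔ lcInB m n (x - 1) y := by unfold lcInB; omega
  have K := lcBGuard_mid (cond := 0 < x) c3 d3
    (lcBGuard_mid (cond := x + 1 < m) c2 d2
      (lcBGuard_mid (cond := 0 < y) c1 d1
        (lcBGuard_mid (cond := y + 1 < n) c0 d0 H)))
  simp only [lcBVisit, hg, hfl, hmd, e1, e2, e3, e4]
  exact K

-- the B loop, run to completion, produces the shortest capped distances
theorem lcBLoop_run (grid : List (List Int)) (m n : Int) (hm : 0 < m) (hn : 0 < n) :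
    ∀ (fuel : Nat) (dist : List Int) (heap : List (Int × Int)),
    BInv grid m n dist heap → 5 * lcSum dist + heap.length < fuel →
    ∀ x y, lcInB m n x y →
      lcDA (lcBLoop grid m n fuel dist heap) n x y = lcTarget grid m n x y := by
  intro fuel
  induction fuel with
  | zero => intro _ _ _ h; omega
  | succ fuel ih =>
    intro dist heap hInv hmu x y hxy
    obtain ⟨hlen, h0, hval, hheap, hP⟩ := hInv
    match heap with
    | [] =>
      show lcDA dist n x y = _
      refine lcFinal_char grid m n dist h0 (fun zx zy hz => (hval zx zy hz).2.1)
        (fun zx zy hz => (hval zx zy hz).2.2) ?_ x y hxy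
      intro zx zy i x' y' hz hd hI
      rcases hP zx zy hz with hc | hmem | hrel
      · have := (hval x' y' hI).2.1
        have := lcW_nonneg grid zx zy i
        omega
      · simp at hmem
      · exact hrel i x' y' hd hI
    | (d, pos) :: heap' =>
      obtain ⟨hx, hy, hI, hpos0, hle0, hltc0⟩ := hheap (d, pos) (List.mem_cons_self ..)
      have hpos : pos = hx * n + hy := hpos0
      have hle : lcDA dist n hx hy ≤ d := hle0
      have hltc : d < 1000000000 := hltc0
      by_cases hstale : PySem.List.pyGetD dist pos 0 < d
      · rw [show lcBLoop grid m n (fuel + 1) dist ((d, pos) :: heap') =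
            lcBLoop grid m n fuel dist heap' from by
          rw [lcBLoop, if_pos hstale]]
        have hDAlt : lcDA dist n hx hy < d := by
          have : PySem.List.pyGetD dist pos 0 = lcDA dist n hx hy := by
            rw [hpos]; rfl
          omega
        refine ih dist heap' ⟨hlen, h0, hval,
          fun e he => hheap e (List.mem_cons_of_mem _ he), ?_⟩ (by simp at hmu ⊢; omega) x y hxy
        intro zx zy hz
        rcases hP zx zy hz with hc | hmem | hrel
        · exact Or.inl hc
        · refine Or.inr (Or.inl ?_)
          rcases List.mem_cons.mp hmem with heq | hmem'
          · exfalso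
            have h1 : lcDA dist n zx zy = d := congrArg Prod.fst heq
            have h2 : zx * n + zy = pos := congrArg Prod.snd heq
            rw [hpos] at h2
            obtain ⟨e1, e2⟩ := lcPos_inj hn hz hI h2
            subst e1; subst e2
            omega
          · exact hmem'
        · exact Or.inr (Or.inr hrel)
      · -- process the popped node
        have hdeq : lcDA dist n hx hy = d := by
          have : PySem.List.pyGetD dist pos 0 = lcDA dist n hx hy := by
            rw [hpos]; rfl
          omega
        have hpathd : lcPath grid m n hx hy d := by
          rcases (hval hx hy hI).2.2 with hc | hp
          · omega
          · rw [hdeq] at hp; exact hp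
        have hmid0 : BMid grid m n hx hy d (5 * lcSum dist + heap'.length)
            [] dist heap' := by
          refine ⟨hlen, h0, hval, fun e he => hheap e (List.mem_cons_of_mem _ he),
            ?_, hI, hpathd, hdeq, by simp, le_refl _⟩
          intro zx zy hz hzne
          rcases hP zx zy hz with hc | hmem | hrel
          · exact Or.inl hc
          · refine Or.inr (Or.inl ?_)
            rcases List.mem_cons.mp hmem with heq | hmem'
            · exfalso
              have h2 : zx * n + zy = pos := congrArg Prod.snd heq
              rw [hpos] at h2
              obtain ⟨e1, e2⟩ := lcPos_inj hn hz hI h2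
              exact hzne ⟨e1, e2⟩
            · exact hmem'
          · exact Or.inr (Or.inr hrel)
        have K := lcBVisit_mid hmid0
        rw [show lcBLoop grid m n (fuel + 1) dist ((d, pos) :: heap') =
            lcBLoop grid m n fuel
              (lcBVisit grid m n d pos (dist, heap')).1
              (lcBVisit grid m n d pos (dist, heap')).2 from by
          rw [lcBLoop, if_neg hstale]]
        rw [hpos]
        obtain ⟨Klen, K0, Kval, Kheap, KPmid, Kxyb, Kpathd, Kxyv, Kdone, Kmu⟩ := K
        refine ih _ _ ⟨Klen, K0, Kval, Kheap, ?_⟩ (by simp at hmu ⊢; omega) x y hxy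
        intro zx zy hz
        by_cases hzeq : zx = hx ∧ zy = hy
        · refine Or.inr (Or.inr ?_)
          intro i x' y' hd' hI'
          obtain ⟨e1, e2⟩ := hzeq
          subst e1; subst e2
          have := Kdone (i, (x', y')) hd' hI'
          rw [Kxyv]
          exact this
        · exact KPmid zx zy hz hzeq

theorem lcSum_init (k : Nat) :
    lcSum ((0 : Int) :: List.replicate k 1000000000) = k * 1000000000 := by
  have h9 : (1000000000 : Int).toNat = 1000000000 := rfl
  simp only [lcSum, List.map_cons, List.map_replicate, List.sum_cons,
    List.sum_replicate, smul_eq_mul, h9]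
  norm_num

theorem lcInit_BInv (grid : List (List Int)) (m n : Int) (hm : 0 < m) (hn : 0 < n) :
    BInv grid m n ((0 : Int) :: List.replicate (m * n - 1).toNat 1000000000)
      [((0 : Int), (0 : Int))] := by
  have hmn : 0 < m * n := mul_pos hm hn
  have hIB0 : lcInB m n 0 0 := ⟨le_refl 0, hm, le_refl 0, hn⟩
  have h0 : lcDA ((0 : Int) :: List.replicate (m * n - 1).toNat 1000000000) n 0 0 = 0 := by
    rw [lcDA_init hIB0, if_pos ⟨rfl, rfl⟩]
  refine ⟨?_, h0, ?_, ?_, ?_⟩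
  · simp; omega
  · intro zx zy hz
    rw [lcDA_init hz]
    split
    · next he =>
      rcases he with ⟨e1, e2⟩; subst e1; subst e2
      exact ⟨le_refl 0, by omega, Or.inr lcPath.start⟩
    · exact ⟨by omega, le_refl _, Or.inl rfl⟩
  · intro e he
    rw [List.mem_singleton] at he; subst he
    refine ⟨0, 0, hIB0, by simp, by rw [h0], by omega⟩
  · intro zx zy hz
    by_cases hzeq : zx = 0 ∧ zy = 0
    · refine Or.inr (Or.inl ?_)
      rcases hzeq with ⟨e1, e2⟩; subst e1; subst e2
      rw [h0, List.mem_singleton]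
      simp
    · refine Or.inl ?_
      rw [lcDA_init hz, if_neg hzeq]

theorem lcB_correct (grid : List (List Int))
    (hm : 0 < (grid.length : Int))
    (hn : 0 < ((PySem.List.pyGetD grid 0 []).length : Int)) :
    lc_1368_alt grid =
      lcTarget grid grid.length ((PySem.List.pyGetD grid 0 []).length : Int)
        ((grid.length : Int) - 1) (((PySem.List.pyGetD grid 0 []).length : Int) - 1) := by
  have hmn : 0 < (grid.length : Int) * ((PySem.List.pyGetD grid 0 []).length : Int) :=
    mul_pos hm hn
  have hIB : lcInB (grid.length : Int) ((PySem.List.pyGetD grid 0 []).length : Int)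
      ((grid.length : Int) - 1) (((PySem.List.pyGetD grid 0 []).length : Int) - 1) := by
    refine ⟨by omega, by omega, by omega, by omega⟩
  have hrun := lcBLoop_run grid (grid.length : Int)
    ((PySem.List.pyGetD grid 0 []).length : Int) hm hn
    (5 * ((grid.length : Int) * ((PySem.List.pyGetD grid 0 []).length : Int)).toNat *
      1000000000 + 2)
    ((0 : Int) :: List.replicate
      ((grid.length : Int) * ((PySem.List.pyGetD grid 0 []).length : Int) - 1).toNat
      1000000000)
    [((0 : Int), (0 : Int))]
    (lcInit_BInv grid _ _ hm hn)
    (by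
      rw [lcSum_init]
      simp only [List.length_singleton]
      omega)
    _ _ hIB
  have hrun' : PySem.List.pyGetD
      (lcBLoop grid (grid.length : Int) ((PySem.List.pyGetD grid 0 []).length : Int)
        (5 * ((grid.length : Int) * ((PySem.List.pyGetD grid 0 []).length : Int)).toNat *
          1000000000 + 2)
        ((0 : Int) :: List.replicate
          ((grid.length : Int) * ((PySem.List.pyGetD grid 0 []).length : Int) - 1).toNat
          1000000000)
        [((0 : Int), (0 : Int))])
      (((grid.length : Int) - 1) * ((PySem.List.pyGetD grid 0 []).length : Int) +
        (((PySem.List.pyGetD grid 0 []).length : Int) - 1)) 0 =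
      lcTarget grid grid.length ((PySem.List.pyGetD grid 0 []).length : Int)
        ((grid.length : Int) - 1) (((PySem.List.pyGetD grid 0 []).length : Int) - 1) := hrun
  rw [show ((grid.length : Int) - 1) * ((PySem.List.pyGetD grid 0 []).length : Int) +
      (((PySem.List.pyGetD grid 0 []).length : Int) - 1) =
      (grid.length : Int) * ((PySem.List.pyGetD grid 0 []).length : Int) - 1 from by
    ring] at hrun'
  simp only [lc_1368_alt]
  exact hrun'

-- ===== A invariant =====
structure AInv (grid : List (List Int)) (m n : Int) (dist : List Int)
    (seen : List (Int × Int)) (Q : List ((Int × Int) × Int)) : Prop where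
  hlen : dist.length = (m * n).toNat
  h0 : lcDA dist n 0 0 = 0
  hval : ∀ zx zy, lcInB m n zx zy → 0 ≤ lcDA dist n zx zy ∧
    lcDA dist n zx zy ≤ 1000000000 ∧
    (lcDA dist n zx zy = 1000000000 ∨ lcPath grid m n zx zy (lcDA dist n zx zy))
  hseen : ∀ u ∈ seen, lcInB m n u.1 u.2 ∧
    (∀ c, lcPath grid m n u.1 u.2 c → lcDA dist n u.1 u.2 ≤ c) ∧
    (∀ i x' y', (i, (x', y')) ∈ lcADirs u.1 u.2 → lcInB m n x' y' →
      lcDA dist n x' y' ≤ lcDA dist n u.1 u.2 + lcW grid u.1 u.2 i)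
  hQ : ∀ e ∈ Q, lcInB m n e.1.1 e.1.2 ∧ lcDA dist n e.1.1 e.1.2 ≤ e.2 ∧
    e.2 < 1000000000
  hsort : Q.Pairwise (fun a b => a.2 ≤ b.2)
  hband : ∀ f, Q.head? = some f → ∀ e ∈ Q, e.2 ≤ f.2 + 1
  hwit : ∀ zx zy, lcInB m n zx zy → (zx, zy) ∉ seen →
    lcDA dist n zx zy < 1000000000 →
    ∃ e ∈ Q, e.1 = (zx, zy) ∧ e.2 = lcDA dist n zx zy
  hstart : ((0 : Int), (0 : Int)) ∈ seen ∨ ∃ v, (((0 : Int), (0 : Int)), v) ∈ Q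

-- mid-fold invariant for A, after popping ((x,y), v₀) (not yet fully relaxed)
structure AMid (grid : List (List Int)) (m n x y v0 : Int)
    (seen : List (Int × Int)) (bud : Nat) (done : List (Int × (Int × Int)))
    (dist : List Int) (Q : List ((Int × Int) × Int)) : Prop where
  hlen : dist.length = (m * n).toNat
  h0 : lcDA dist n 0 0 = 0
  hval : ∀ zx zy, lcInB m n zx zy → 0 ≤ lcDA dist n zx zy ∧
    lcDA dist n zx zy ≤ 1000000000 ∧
    (lcDA dist n zx zy = 1000000000 ∨ lcPath grid m n zx zy (lcDA dist n zx zy))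
  hseen : ∀ u ∈ seen, lcInB m n u.1 u.2 ∧
    (∀ c, lcPath grid m n u.1 u.2 c → lcDA dist n u.1 u.2 ≤ c) ∧
    (∀ i x' y', (i, (x', y')) ∈ lcADirs u.1 u.2 → lcInB m n x' y' →
      lcDA dist n x' y' ≤ lcDA dist n u.1 u.2 + lcW grid u.1 u.2 i)
  hQ : ∀ e ∈ Q, lcInB m n e.1.1 e.1.2 ∧ lcDA dist n e.1.1 e.1.2 ≤ e.2 ∧
    v0 ≤ e.2 ∧ e.2 ≤ v0 + 1 ∧ e.2 < 1000000000
  hsort : Q.Pairwise (fun a b => a.2 ≤ b.2)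
  hwit : ∀ zx zy, lcInB m n zx zy → (zx, zy) ∉ seen → (zx, zy) ≠ (x, y) →
    lcDA dist n zx zy < 1000000000 →
    ∃ e ∈ Q, e.1 = (zx, zy) ∧ e.2 = lcDA dist n zx zy
  hstart : (((0 : Int), (0 : Int)) ∈ seen ∨ ((0 : Int), (0 : Int)) = (x, y)) ∨
    ∃ v, (((0 : Int), (0 : Int)), v) ∈ Q
  hxyb : lcInB m n x y
  hv0 : 0 ≤ v0 ∧ v0 < 1000000000
  hxyv : lcDA dist n x y = v0
  hxypath : lcPath grid m n x y v0
  hxymin : ∀ c, lcPath grid m n x y c → v0 ≤ c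
  hdone : ∀ iv ∈ done, lcInB m n iv.2.1 iv.2.2 →
    lcDA dist n iv.2.1 iv.2.2 ≤ v0 + lcW grid x y iv.1
  hmu : 5 * lcSum dist + Q.length ≤ bud

-- one A relaxation step preserves the mid-fold invariant
theorem lcAStep_mid {grid : List (List Int)} {m n x y v0 : Int}
    {seen : List (Int × Int)} {bud : Nat} {done : List (Int × (Int × Int))}
    {dist : List Int} {Q : List ((Int × Int) × Int)}
    {iv : Int × (Int × Int)} (hiv : iv ∈ lcADirs x y)
    (H : AMid grid m n x y v0 seen bud done dist Q) :
    ∃ dist₂ Q₂, lcAStep grid m n x y (dist, Q.map Prod.fst) iv = (dist₂, Q₂.map Prod.fst) ∧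
      AMid grid m n x y v0 seen bud (done ++ [iv]) dist₂ Q₂ := by
  obtain ⟨hlen, h0, hval, hseen, hQ, hsort, hwit, hstart, hxyb, hv0, hxyv,
    hxypath, hxymin, hdone, hmu⟩ := H
  have hnew : PySem.List.pyGetD dist (x * n + y) 0 +
      (if lcG grid x y ≠ iv.1 + 1 then (1 : Int) else 0) = v0 + lcW grid x y iv.1 := by
    rw [lcW_flip]
    have h1 : PySem.List.pyGetD dist (x * n + y) 0 = v0 := hxyv
    rw [h1]
  by_cases hbnd : 0 ≤ iv.2.1 ∧ iv.2.1 < m ∧ 0 ≤ iv.2.2 ∧ iv.2.2 < n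
  · have hbInB : lcInB m n iv.2.1 iv.2.2 := hbnd
    by_cases hcmp : PySem.List.pyGetD dist (x * n + y) 0 +
        (if lcG grid x y ≠ iv.1 + 1 then (1 : Int) else 0) <
        PySem.List.pyGetD dist (iv.2.1 * n + iv.2.2) 0
    · -- successful relaxation
      have hcmp' : v0 + lcW grid x y iv.1 < lcDA dist n iv.2.1 iv.2.2 := by
        rw [← hnew]; exact hcmp
      have hlt := hcmp'
      have hnew0 : 0 ≤ v0 + lcW grid x y iv.1 := by
        have := lcW_nonneg grid x y iv.1; omega
      have hnewlt : v0 + lcW grid x y iv.1 < 1000000000 := by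
        have := (hval _ _ hbInB).2.1; omega
      have hpath_new : lcPath grid m n iv.2.1 iv.2.2 (v0 + lcW grid x y iv.1) :=
        lcPath.step hxypath hxyb (by simpa using hiv) hbInB
      have hne_xy : ¬(iv.2.1 = x ∧ iv.2.2 = y) := by
        have := lcDirs_ne_self hiv
        rintro ⟨e1, e2⟩
        exact this (Prod.ext_iff.mpr ⟨e1, e2⟩)
      have hnbr_unseen : iv.2 ∉ seen := by
        intro hmem
        obtain ⟨_, hmin, _⟩ := hseen iv.2 hmem
        have := hmin _ hpath_new
        omega
      have hset : ∀ {zx zy : Int}, lcInB m n zx zy →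
          lcDA (PySem.List.pySetD dist (iv.2.1 * n + iv.2.2)
            (v0 + lcW grid x y iv.1)) n zx zy =
          if zx = iv.2.1 ∧ zy = iv.2.2 then v0 + lcW grid x y iv.1
          else lcDA dist n zx zy := by
        intro zx zy hz
        exact lcDA_set dist hlen hbInB hz _
      have hDAle : ∀ {zx zy : Int}, lcInB m n zx zy →
          lcDA (PySem.List.pySetD dist (iv.2.1 * n + iv.2.2)
            (v0 + lcW grid x y iv.1)) n zx zy ≤ lcDA dist n zx zy := by
        intro zx zy hz
        rw [hset hz]
        split
        · next he => rcases he with ⟨e1, e2⟩; subst e1; subst e2; omega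
        · omega
      -- shared field proofs (independent of push side)
      have Flen : (PySem.List.pySetD dist (iv.2.1 * n + iv.2.2)
          (v0 + lcW grid x y iv.1)).length = (m * n).toNat := by
        rw [PySem.List.length_pySetD]; exact hlen
      have F0 : lcDA (PySem.List.pySetD dist (iv.2.1 * n + iv.2.2)
          (v0 + lcW grid x y iv.1)) n 0 0 = 0 := by
        have h00 : lcInB m n 0 0 := by
          obtain ⟨h1, h2, h3, h4⟩ := hxyb
          exact ⟨le_refl 0, by omega, le_refl 0, by omega⟩
        rw [hset h00]
        split
        · next he =>
          rcases he with ⟨e1, e2⟩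
          rw [← e1, ← e2] at hcmp'
          rw [show lcDA dist n 0 0 = 0 from h0] at hcmp'
          omega
        · exact h0
      have Fval : ∀ zx zy, lcInB m n zx zy →
          0 ≤ lcDA (PySem.List.pySetD dist (iv.2.1 * n + iv.2.2)
            (v0 + lcW grid x y iv.1)) n zx zy ∧
          lcDA (PySem.List.pySetD dist (iv.2.1 * n + iv.2.2)
            (v0 + lcW grid x y iv.1)) n zx zy ≤ 1000000000 ∧
          (lcDA (PySem.List.pySetD dist (iv.2.1 * n + iv.2.2)
            (v0 + lcW grid x y iv.1)) n zx zy = 1000000000 ∨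
           lcPath grid m n zx zy (lcDA (PySem.List.pySetD dist
            (iv.2.1 * n + iv.2.2) (v0 + lcW grid x y iv.1)) n zx zy)) := by
        intro zx zy hz
        rw [hset hz]
        split
        · next he =>
          rcases he with ⟨e1, e2⟩; subst e1; subst e2
          exact ⟨hnew0, by omega, Or.inr hpath_new⟩
        · exact hval zx zy hz
      have Fseen : ∀ u ∈ seen, lcInB m n u.1 u.2 ∧
          (∀ c, lcPath grid m n u.1 u.2 c →
            lcDA (PySem.List.pySetD dist (iv.2.1 * n + iv.2.2)
              (v0 + lcW grid x y iv.1)) n u.1 u.2 ≤ c) ∧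
          (∀ i x' y', (i, (x', y')) ∈ lcADirs u.1 u.2 → lcInB m n x' y' →
            lcDA (PySem.List.pySetD dist (iv.2.1 * n + iv.2.2)
              (v0 + lcW grid x y iv.1)) n x' y' ≤
            lcDA (PySem.List.pySetD dist (iv.2.1 * n + iv.2.2)
              (v0 + lcW grid x y iv.1)) n u.1 u.2 + lcW grid u.1 u.2 i) := by
        intro u hu
        obtain ⟨hI, hmin, hstab⟩ := hseen u hu
        have huneq : ¬(u.1 = iv.2.1 ∧ u.2 = iv.2.2) := by
          rintro ⟨e1, e2⟩
          apply hnbr_unseen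
          have : u = iv.2 := Prod.ext_iff.mpr ⟨e1, e2⟩
          rw [← this]; exact hu
        have huDA : lcDA (PySem.List.pySetD dist (iv.2.1 * n + iv.2.2)
            (v0 + lcW grid x y iv.1)) n u.1 u.2 = lcDA dist n u.1 u.2 := by
          rw [hset hI, if_neg huneq]
        refine ⟨hI, ?_, ?_⟩
        · intro c hc; rw [huDA]; exact hmin c hc
        · intro i x' y' hd hI'
          rw [huDA]
          have := hDAle hI'
          have := hstab i x' y' hd hI'
          omega
      have Fxyv : lcDA (PySem.List.pySetD dist (iv.2.1 * n + iv.2.2)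
          (v0 + lcW grid x y iv.1)) n x y = v0 := by
        rw [hset hxyb]
        rw [if_neg (by rintro ⟨e1, e2⟩; exact hne_xy ⟨e1.symm, e2.symm⟩)]
        exact hxyv
      have Fdone : ∀ jv ∈ done ++ [iv], lcInB m n jv.2.1 jv.2.2 →
          lcDA (PySem.List.pySetD dist (iv.2.1 * n + iv.2.2)
            (v0 + lcW grid x y iv.1)) n jv.2.1 jv.2.2 ≤ v0 + lcW grid x y jv.1 := by
        intro jv hj hIj
        rcases List.mem_append.mp hj with hj | hj
        · have := hdone jv hj hIj
          have := hDAle hIj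
          omega
        · rw [List.mem_singleton] at hj; subst hj
          rw [hset hIj, if_pos ⟨rfl, rfl⟩]
      have Fsum : lcSum (PySem.List.pySetD dist (iv.2.1 * n + iv.2.2)
          (v0 + lcW grid x y iv.1)) + 1 ≤ lcSum dist := by
        have hb0 := lcPos_bounds hbInB
        have htlt : (iv.2.1 * n + iv.2.2).toNat < dist.length := by omega
        have hgetd : lcDA dist n iv.2.1 iv.2.2 = dist[(iv.2.1 * n + iv.2.2).toNat] := by
          unfold lcDA
          rw [PySem.List.pyGetD_eq_getElem _ _ (by omega) (by omega)]
        have hsum := lcSum_set_lt htlt hnew0 (by rw [← hgetd]; omega)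
        rw [PySem.List.pySetD_of_nonneg _ _ (by omega)]
        omega
      by_cases hfront : lcG grid x y = iv.1 + 1
      · -- zero-weight edge: push to the FRONT with value v0
        have hw0 : lcW grid x y iv.1 = 0 := by unfold lcW; rw [if_pos hfront]
        have hst : lcAStep grid m n x y (dist, Q.map Prod.fst) iv =
            (PySem.List.pySetD dist (iv.2.1 * n + iv.2.2) (v0 + lcW grid x y iv.1),
             ((iv.2, v0 + lcW grid x y iv.1) :: Q).map Prod.fst) := by
          unfold lcAStep
          rw [if_pos ⟨hbnd.1, hbnd.2.1, hbnd.2.2.1, hbnd.2.2.2, hcmp⟩, if_pos hfront]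
          rw [hnew]
          rfl
        refine ⟨_, _, hst, ?_⟩
        refine ⟨Flen, F0, Fval, Fseen, ?_, ?_, ?_, ?_, hxyb, hv0, Fxyv,
          hxypath, hxymin, Fdone, ?_⟩
        · intro e he
          rcases List.mem_cons.mp he with rfl | he
          · refine ⟨hbInB, ?_, by omega, by omega, by omega⟩
            rw [hset hbInB, if_pos ⟨rfl, rfl⟩]
          · obtain ⟨hI, hle, hlo, hhi, hcl⟩ := hQ e he
            exact ⟨hI, le_trans (hDAle hI) hle, hlo, hhi, hcl⟩
        · rw [List.pairwise_cons]
          refine ⟨?_, hsort⟩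
          intro e he
          have := (hQ e he).2.2.1
          omega
        · intro zx zy hz hzs hzxy hzlt
          by_cases hzeq : zx = iv.2.1 ∧ zy = iv.2.2
          · refine ⟨(iv.2, v0 + lcW grid x y iv.1), List.mem_cons_self .., ?_, ?_⟩
            · rcases hzeq with ⟨e1, e2⟩; subst e1; subst e2; rfl
            · rw [hset hz, if_pos hzeq]
          · rw [hset hz, if_neg hzeq] at hzlt ⊢
            obtain ⟨e, he, he1, he2⟩ := hwit zx zy hz hzs hzxy hzlt
            exact ⟨e, List.mem_cons_of_mem _ he, he1, he2⟩
        · rcases hstart with hs | ⟨v, hv⟩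
          · exact Or.inl hs
          · exact Or.inr ⟨v, List.mem_cons_of_mem _ hv⟩
        · have hlq : (((iv.2, v0 + lcW grid x y iv.1) :: Q)).length = Q.length + 1 := rfl
          rw [hlq]
          have := Fsum
          omega
      · -- weight-one edge: push to the BACK with value v0 + 1
        have hw1 : lcW grid x y iv.1 = 1 := by unfold lcW; rw [if_neg hfront]
        have hst : lcAStep grid m n x y (dist, Q.map Prod.fst) iv =
            (PySem.List.pySetD dist (iv.2.1 * n + iv.2.2) (v0 + lcW grid x y iv.1),
             (Q ++ [(iv.2, v0 + lcW grid x y iv.1)]).map Prod.fst) := by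
          unfold lcAStep
          rw [if_pos ⟨hbnd.1, hbnd.2.1, hbnd.2.2.1, hbnd.2.2.2, hcmp⟩, if_neg hfront]
          rw [hnew, List.map_append]
          rfl
        refine ⟨_, _, hst, ?_⟩
        refine ⟨Flen, F0, Fval, Fseen, ?_, ?_, ?_, ?_, hxyb, hv0, Fxyv,
          hxypath, hxymin, Fdone, ?_⟩
        · intro e he
          rcases List.mem_append.mp he with he | he
          · obtain ⟨hI, hle, hlo, hhi, hcl⟩ := hQ e he
            exact ⟨hI, le_trans (hDAle hI) hle, hlo, hhi, hcl⟩
          · rw [List.mem_singleton] at he; subst he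
            refine ⟨hbInB, ?_, by omega, by omega, by omega⟩
            rw [hset hbInB, if_pos ⟨rfl, rfl⟩]
        · rw [List.pairwise_append]
          refine ⟨hsort, List.pairwise_singleton _ _, ?_⟩
          intro e he f hf
          rw [List.mem_singleton] at hf; subst hf
          have := (hQ e he).2.2.2.1
          omega
        · intro zx zy hz hzs hzxy hzlt
          by_cases hzeq : zx = iv.2.1 ∧ zy = iv.2.2
          · refine ⟨(iv.2, v0 + lcW grid x y iv.1),
              List.mem_append.mpr (Or.inr (List.mem_singleton.mpr rfl)), ?_, ?_⟩
            · rcases hzeq with ⟨e1, e2⟩; subst e1; subst e2; rfl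
            · rw [hset hz, if_pos hzeq]
          · rw [hset hz, if_neg hzeq] at hzlt ⊢
            obtain ⟨e, he, he1, he2⟩ := hwit zx zy hz hzs hzxy hzlt
            exact ⟨e, List.mem_append.mpr (Or.inl he), he1, he2⟩
        · rcases hstart with hs | ⟨v, hv⟩
          · exact Or.inl hs
          · exact Or.inr ⟨v, List.mem_append.mpr (Or.inl hv)⟩
        · rw [List.length_append]
          have := Fsum
          simp only [List.length_singleton]
          omega
    · -- no improvement
      have hst : lcAStep grid m n x y (dist, Q.map Prod.fst) iv =
          (dist, Q.map Prod.fst) := by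
        unfold lcAStep
        rw [if_neg (by
          rintro ⟨_, _, _, _, hc⟩
          exact hcmp hc)]
      refine ⟨dist, Q, hst, ⟨hlen, h0, hval, hseen, hQ, hsort, hwit, hstart,
        hxyb, hv0, hxyv, hxypath, hxymin, ?_, hmu⟩⟩
      intro jv hj hIj
      rcases List.mem_append.mp hj with hj | hj
      · exact hdone jv hj hIj
      · rw [List.mem_singleton] at hj; subst hj
        rw [hnew] at hcmp
        have h2 := not_lt.mp hcmp
        exact h2
  · -- out of bounds
    have hst : lcAStep grid m n x y (dist, Q.map Prod.fst) iv =
        (dist, Q.map Prod.fst) := by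
      unfold lcAStep
      rw [if_neg (by
        rintro ⟨h1, h2, h3, h4, _⟩
        exact hbnd ⟨h1, h2, h3, h4⟩)]
    refine ⟨dist, Q, hst, ⟨hlen, h0, hval, hseen, hQ, hsort, hwit, hstart,
      hxyb, hv0, hxyv, hxypath, hxymin, ?_, hmu⟩⟩
    intro jv hj hIj
    rcases List.mem_append.mp hj with hj | hj
    · exact hdone jv hj hIj
    · rw [List.mem_singleton] at hj; subst hj
      exact absurd hIj hbnd

-- folding A's relaxation over a suffix of the direction list
theorem lcAFold {grid : List (List Int)} {m n x y v0 : Int}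
    {seen : List (Int × Int)} {bud : Nat} :
    ∀ (l done : List (Int × (Int × Int))) (dist : List Int)
      (Q : List ((Int × Int) × Int)),
    done ++ l = lcADirs x y →
    AMid grid m n x y v0 seen bud done dist Q →
    ∃ dist₂ Q₂,
      l.foldl (lcAStep grid m n x y) (dist, Q.map Prod.fst) = (dist₂, Q₂.map Prod.fst) ∧
      AMid grid m n x y v0 seen bud (lcADirs x y) dist₂ Q₂ := by
  intro l
  induction l with
  | nil =>
    intro done dist Q happ H
    simp only [List.append_nil] at happ
    subst happ
    exact ⟨dist, Q, rfl, H⟩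
  | cons iv l' ih =>
    intro done dist Q happ H
    have hiv : iv ∈ lcADirs x y := by
      rw [← happ]; exact List.mem_append.mpr (Or.inr (List.mem_cons_self ..))
    obtain ⟨dist₁, Q₁, hst, H₁⟩ := lcAStep_mid hiv H
    have happ' : (done ++ [iv]) ++ l' = lcADirs x y := by
      rw [← happ]; simp
    obtain ⟨dist₂, Q₂, hst₂, H₂⟩ := ih (done ++ [iv]) dist₁ Q₁ happ' H₁
    refine ⟨dist₂, Q₂, ?_, H₂⟩
    rw [List.foldl_cons, hst, hst₂]

-- when an unseen node is popped from the deque, its distance entry is minimal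
theorem lcPop_min {grid : List (List Int)} {m n : Int} {dist : List Int}
    {seen : List (Int × Int)} {e₀ : (Int × Int) × Int} {Q' : List ((Int × Int) × Int)}
    (H : AInv grid m n dist seen (e₀ :: Q')) :
    ∀ zx zy c, lcPath grid m n zx zy c → lcDA dist n zx zy ≤ c ∨ e₀.2 ≤ c := by
  obtain ⟨hlen, h0, hval, hseen, hQ, hsort, hband, hwit, hstart⟩ := H
  have hv0lt : e₀.2 < 1000000000 := (hQ e₀ (List.mem_cons_self ..)).2.2
  intro zx zy c hc
  induction hc with
  | start => exact Or.inl (le_of_eq h0)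
  | @step px py c i px' py' hp hbI hd hbI' ih =>
    have hw0 := lcW_nonneg grid px py i
    rcases ih with hL | hR
    · by_cases hs : (px, py) ∈ seen
      · obtain ⟨_, _, hstab⟩ := hseen (px, py) hs
        have h2 : lcDA dist n px' py' ≤ lcDA dist n px py + lcW grid px py i :=
          hstab i px' py' hd hbI'
        exact Or.inl (by omega)
      · rcases lt_or_ge (lcDA dist n px py) 1000000000 with hlt | hge
        · obtain ⟨e, he, he1, he2⟩ := hwit px py hbI hs hlt
          have hv0le : e₀.2 ≤ e.2 := by
            rcases List.mem_cons.mp he with rfl | he'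
            · exact le_refl _
            · exact List.rel_of_pairwise_cons hsort he'
          refine Or.inr (by omega)
        · exact Or.inr (by omega)
    · exact Or.inr (by omega)

-- the A loop, run to completion, produces the shortest capped distances
theorem lcALoop_run (grid : List (List Int)) (m n : Int) (hm : 0 < m) (hn : 0 < n) :
    ∀ (fuel : Nat) (dist : List Int) (seen : List (Int × Int))
      (Q : List ((Int × Int) × Int)),
    AInv grid m n dist seen Q → 5 * lcSum dist + Q.length < fuel →
    ∀ x y, lcInB m n x y →
      lcDA (lcALoop grid m n fuel dist seen (Q.map Prod.fst)) n x y =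
        lcTarget grid m n x y := by
  intro fuel
  induction fuel with
  | zero => intro _ _ _ h; omega
  | succ fuel ih =>
    intro dist seen Q hInv hmu x y hxy
    match Q with
    | [] =>
      show lcDA dist n x y = _
      obtain ⟨hlen, h0, hval, hseen, hQ, hsort, hband, hwit, hstart⟩ := hInv
      refine lcFinal_char grid m n dist h0 (fun zx zy hz => (hval zx zy hz).2.1)
        (fun zx zy hz => (hval zx zy hz).2.2) ?_ x y hxy
      intro zx zy i x' y' hz hd hI
      by_cases hs : (zx, zy) ∈ seen
      · exact (hseen (zx, zy) hs).2.2 i x' y' hd hI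
      · rcases lt_or_ge (lcDA dist n zx zy) 1000000000 with hlt | hge
        · obtain ⟨e, he, _⟩ := hwit zx zy hz hs hlt
          simp at he
        · have := (hval x' y' hI).2.1
          have := (hval zx zy hz).2.1
          have := lcW_nonneg grid zx zy i
          omega
    | e₀ :: Q' =>
      have hmap : (e₀ :: Q').map Prod.fst = (e₀.1.1, e₀.1.2) :: Q'.map Prod.fst := by
        simp
      rw [hmap]
      have hE := hInv.hQ e₀ (List.mem_cons_self ..)
      by_cases hs : (e₀.1.1, e₀.1.2) ∈ seen
      · -- already seen: skip
        rw [show lcALoop grid m n (fuel + 1) dist seen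
              ((e₀.1.1, e₀.1.2) :: Q'.map Prod.fst) =
            lcALoop grid m n fuel dist seen (Q'.map Prod.fst) from by
          rw [lcALoop, if_pos ((PySem.Set.contains_iff seen _).mpr hs)]]
        obtain ⟨hlen, h0, hval, hseen, hQ, hsort, hband, hwit, hstart⟩ := hInv
        refine ih dist seen Q' ⟨hlen, h0, hval, hseen,
          fun e he => hQ e (List.mem_cons_of_mem _ he),
          hsort.sublist (List.sublist_cons_self _ _), ?_, ?_, ?_⟩
          (by simp at hmu ⊢; omega) x y hxy
        · intro f hf e he
          have h1 := hband e₀ rfl e (List.mem_cons_of_mem _ he)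
          have h2 : e₀.2 ≤ f.2 :=
            List.rel_of_pairwise_cons hsort (List.mem_of_mem_head? hf)
          omega
        · intro zx zy hz hzs hzlt
          obtain ⟨e, he, he1, he2⟩ := hwit zx zy hz hzs hzlt
          rcases List.mem_cons.mp he with rfl | he'
          · exfalso
            apply hzs
            have h' : e.1 ∈ seen := hs
            rw [he1] at h'
            exact h'
          · exact ⟨e, he', he1, he2⟩
        · rcases hstart with hst | ⟨v, hv⟩
          · exact Or.inl hst
          · rcases List.mem_cons.mp hv with heq | hv'
            · refine Or.inl ?_
              have h00 : ((0 : Int), (0 : Int)) = e₀.1 := congrArg Prod.fst heq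
              have h' : e₀.1 ∈ seen := hs
              rw [h00]
              exact h'
            · exact Or.inr ⟨v, hv'⟩
      · -- fresh node: pop it, mark seen, relax the four directions
        have hpop := lcPop_min hInv
        obtain ⟨hlen, h0, hval, hseen, hQ, hsort, hband, hwit, hstart⟩ := hInv
        have hE' : lcInB m n e₀.1.1 e₀.1.2 ∧
            lcDA dist n e₀.1.1 e₀.1.2 ≤ e₀.2 ∧ e₀.2 < 1000000000 := hE
        obtain ⟨hI0, hle0, hlt0⟩ := hE'
        have hDAeq : lcDA dist n e₀.1.1 e₀.1.2 = e₀.2 := by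
          obtain ⟨e, he, he1, he2⟩ := hwit e₀.1.1 e₀.1.2 hI0 hs (by omega)
          rcases List.mem_cons.mp he with heq | he'
          · rw [← he2, heq]
          · have := List.rel_of_pairwise_cons hsort he'
            omega
        have hmin : ∀ c, lcPath grid m n e₀.1.1 e₀.1.2 c → e₀.2 ≤ c := by
          intro c hc
          rcases hpop e₀.1.1 e₀.1.2 c hc with hL | hR
          · omega
          · exact hR
        have hpath0 : lcPath grid m n e₀.1.1 e₀.1.2 e₀.2 := by
          rcases (hval _ _ hI0).2.2 with hc | hp
          · omega
          · rw [hDAeq] at hp; exact hp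
        have hv00 : 0 ≤ e₀.2 := le_trans (hval _ _ hI0).1 hle0
        have hmid0 : AMid grid m n e₀.1.1 e₀.1.2 e₀.2 seen
            (5 * lcSum dist + Q'.length) [] dist Q' := by
          refine ⟨hlen, h0, hval, hseen, ?_, hsort.sublist (List.sublist_cons_self _ _),
            ?_, ?_, hI0, ⟨hv00, hlt0⟩, hDAeq, hpath0, hmin, by simp, le_refl _⟩
          · intro e he
            obtain ⟨hI, hle, hlt⟩ := hQ e (List.mem_cons_of_mem _ he)
            have hge : e₀.2 ≤ e.2 := List.rel_of_pairwise_cons hsort he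
            have hb := hband e₀ rfl e (List.mem_cons_of_mem _ he)
            exact ⟨hI, hle, hge, hb, hlt⟩
          · intro zx zy hz hzs hzxy hzlt
            obtain ⟨e, he, he1, he2⟩ := hwit zx zy hz hzs hzlt
            rcases List.mem_cons.mp he with rfl | he'
            · exfalso
              apply hzxy
              rw [← he1]
            · exact ⟨e, he', he1, he2⟩
          · rcases hstart with hst | ⟨v, hv⟩
            · exact Or.inl (Or.inl hst)
            · rcases List.mem_cons.mp hv with heq | hv'
              · refine Or.inl (Or.inr ?_)
                exact congrArg Prod.fst heq
              · exact Or.inr ⟨v, hv'⟩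
        obtain ⟨dist₂, Q₂, hfold, K⟩ :=
          lcAFold (lcADirs e₀.1.1 e₀.1.2) [] dist Q' (by simp) hmid0
        rw [show lcALoop grid m n (fuel + 1) dist seen
              ((e₀.1.1, e₀.1.2) :: Q'.map Prod.fst) =
            lcALoop grid m n fuel
              ((lcADirs e₀.1.1 e₀.1.2).foldl (lcAStep grid m n e₀.1.1 e₀.1.2)
                (dist, Q'.map Prod.fst)).1
              (PySem.Set.add seen (e₀.1.1, e₀.1.2))
              ((lcADirs e₀.1.1 e₀.1.2).foldl (lcAStep grid m n e₀.1.1 e₀.1.2)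
                (dist, Q'.map Prod.fst)).2 from by
          rw [lcALoop,
            if_neg (by rw [PySem.Set.contains_iff]; exact hs)]]
        rw [hfold]
        obtain ⟨Klen, K0, Kval, Kseen, KQ, Ksort, Kwit, Kstart, Kxyb, Kv0, Kxyv,
          Kxypath, Kxymin, Kdone, Kmu⟩ := K
        refine ih dist₂ (PySem.Set.add seen (e₀.1.1, e₀.1.2)) Q₂
          ⟨Klen, K0, Kval, ?_, ?_, Ksort, ?_, ?_, ?_⟩
          (by simp only [List.length_cons] at hmu; omega) x y hxy
        · intro u hu
          rcases (PySem.Set.mem_add seen _ u).mp hu with hu' | rfl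
          · exact Kseen u hu'
          · refine ⟨Kxyb, ?_, ?_⟩
            · intro c hc; rw [Kxyv]; exact Kxymin c hc
            · intro i x' y' hd hI'
              rw [Kxyv]
              exact Kdone (i, (x', y')) hd hI'
        · intro e he
          obtain ⟨hI, hle, _, _, hlt⟩ := KQ e he
          exact ⟨hI, hle, hlt⟩
        · intro f hf e he
          have h1 := (KQ e he).2.2.2.1
          have h2 := (KQ f (List.mem_of_mem_head? hf)).2.2.1
          omega
        · intro zx zy hz hzs hzlt
          rw [PySem.Set.mem_add] at hzs
          push Not at hzs
          exact Kwit zx zy hz hzs.1 hzs.2 hzlt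
        · rcases Kstart with (hst | heq) | ⟨v, hv⟩
          · exact Or.inl ((PySem.Set.mem_add seen _ _).mpr (Or.inl hst))
          · exact Or.inl ((PySem.Set.mem_add seen _ _).mpr (Or.inr heq))
          · exact Or.inr ⟨v, hv⟩

theorem lcInit_AInv (grid : List (List Int)) (m n : Int) (hm : 0 < m) (hn : 0 < n) :
    AInv grid m n ((0 : Int) :: List.replicate (m * n - 1).toNat 1000000000)
      [] [(((0 : Int), (0 : Int)), (0 : Int))] := by
  have hmn : 0 < m * n := mul_pos hm hn
  have hIB0 : lcInB m n 0 0 := ⟨le_refl 0, hm, le_refl 0, hn⟩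
  have h0 : lcDA ((0 : Int) :: List.replicate (m * n - 1).toNat 1000000000) n 0 0 = 0 := by
    rw [lcDA_init hIB0, if_pos ⟨rfl, rfl⟩]
  refine ⟨?_, h0, ?_, ?_, ?_, ?_, ?_, ?_, ?_⟩
  · simp; omega
  · intro zx zy hz
    rw [lcDA_init hz]
    split
    · next he =>
      rcases he with ⟨e1, e2⟩; subst e1; subst e2
      exact ⟨le_refl 0, by omega, Or.inr lcPath.start⟩
    · exact ⟨by omega, le_refl _, Or.inl rfl⟩
  · intro u hu; simp at hu
  · intro e he
    rw [List.mem_singleton] at he; subst he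
    exact ⟨hIB0, by rw [h0], by omega⟩
  · exact List.pairwise_singleton _ _
  · intro f hf e he
    rw [List.mem_singleton] at he; subst he
    simp at hf; subst hf
    omega
  · intro zx zy hz hzs hzlt
    by_cases hzeq : zx = 0 ∧ zy = 0
    · rcases hzeq with ⟨e1, e2⟩; subst e1; subst e2
      refine ⟨(((0 : Int), (0 : Int)), (0 : Int)), List.mem_singleton.mpr rfl, rfl, ?_⟩
      rw [h0]
    · exfalso
      rw [lcDA_init hz, if_neg hzeq] at hzlt
      omega
  · exact Or.inr ⟨0, List.mem_singleton.mpr rfl⟩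

theorem lcA_correct (grid : List (List Int))
    (hm : 0 < (grid.length : Int))
    (hn : 0 < ((PySem.List.pyGetD grid 0 []).length : Int)) :
    lc_1368 grid =
      lcTarget grid grid.length ((PySem.List.pyGetD grid 0 []).length : Int)
        ((grid.length : Int) - 1) (((PySem.List.pyGetD grid 0 []).length : Int) - 1) := by
  unfold lc_1368
  have hmn : 0 < (grid.length : Int) * ((PySem.List.pyGetD grid 0 []).length : Int) :=
    mul_pos hm hn
  have hIB : lcInB (grid.length : Int) ((PySem.List.pyGetD grid 0 []).length : Int)
      ((grid.length : Int) - 1) (((PySem.List.pyGetD grid 0 []).length : Int) - 1) := by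
    refine ⟨by omega, by omega, by omega, by omega⟩
  have hrun := lcALoop_run grid (grid.length : Int)
    ((PySem.List.pyGetD grid 0 []).length : Int) hm hn
    (5 * ((grid.length : Int) * ((PySem.List.pyGetD grid 0 []).length : Int)).toNat *
      1000000000 + 2)
    ((0 : Int) :: List.replicate
      ((grid.length : Int) * ((PySem.List.pyGetD grid 0 []).length : Int) - 1).toNat
      1000000000)
    [] [(((0 : Int), (0 : Int)), (0 : Int))]
    (lcInit_AInv grid _ _ hm hn)
    (by
      rw [lcSum_init]
      simp only [List.length_singleton]
      omega)
    _ _ hIB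
  have hrun' : PySem.List.pyGetD
      (lcALoop grid (grid.length : Int) ((PySem.List.pyGetD grid 0 []).length : Int)
        (5 * ((grid.length : Int) * ((PySem.List.pyGetD grid 0 []).length : Int)).toNat *
          1000000000 + 2)
        ((0 : Int) :: List.replicate
          ((grid.length : Int) * ((PySem.List.pyGetD grid 0 []).length : Int) - 1).toNat
          1000000000)
        PySem.Set.empty [((0 : Int), (0 : Int))])
      (((grid.length : Int) - 1) * ((PySem.List.pyGetD grid 0 []).length : Int) +
        (((PySem.List.pyGetD grid 0 []).length : Int) - 1)) 0 =
      lcTarget grid grid.length ((PySem.List.pyGetD grid 0 []).length : Int)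
        ((grid.length : Int) - 1) (((PySem.List.pyGetD grid 0 []).length : Int) - 1) := hrun
  rw [show ((grid.length : Int) - 1) * ((PySem.List.pyGetD grid 0 []).length : Int) +
      (((PySem.List.pyGetD grid 0 []).length : Int) - 1) =
      (grid.length : Int) * ((PySem.List.pyGetD grid 0 []).length : Int) - 1 from by
    ring] at hrun'
  exact hrun'

-- ===== VERDICT (by name: the statement is the Claim_ definition above) =====
theorem lc_1368_spec : Claim_equal_lc_1368 := by
  intro grid _hdom hpre
  obtain ⟨h1, h2, _⟩ := hpre
  have hm : 0 < (grid.length : Int) := by exact_mod_cast h1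
  have hn : 0 < ((PySem.List.pyGetD grid 0 []).length : Int) := by exact_mod_cast h2
  unfold Spec_lc_1368
  rw [lcA_correct grid hm hn, lcB_correct grid hm hn]
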